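-- pv_equiv track=rewrite | github.com/nrajlekhak/DSA-practice | calculator-py/main.py | bit_sifted_div
-- ===== SOURCE A (Python) =====
-- def bit_sifted_div(dividend:int, divisor:int):
--
--
--     # when dividend and divisor are 0 illegal Mathematical Operation
--     if dividend == 0 and divisor == 0:
--         raise Exception('Illegal Mathematical Operation, dividing 0 by 0')
--
--     # when dividend is 0, result of division is also 0
--     if dividend == 0:
--         return {'quotient': 0, 'remainder': 0}
--
--     # when divisor is 0, result of division is infinity
--     if divisor == 0:
--         return {'quotient':'infinity', 'remainder': None}
--
--
--     sign = -1 if (dividend <0 and divisor>0) or (divisor<0 and dividend>0) else 1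
--
--     dividend = abs(dividend)
--     divisor = abs(divisor)
--
--     quotient = 0
--     remainder = dividend
--
--     for i in range(31,-1,-1):
--         di = divisor << i
--         if  di <= remainder:
--             remainder-=di
--             quotient += 1 <<i
--
--     if sign < 0:
--         quotient = -quotient
--
--     return {'quotient': quotient, 'remainder': remainder }
-- ===== SOURCE B (Python) =====
-- def bit_sifted_div(dividend: int, divisor: int):
--     if dividend == 0 and divisor == 0:
--         raise Exception('Illegal Mathematical Operation, dividing 0 by 0')
--     if dividend == 0:
--         return {'quotient': 0, 'remainder': 0}
--     if divisor == 0: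
--         return {'quotient': 'infinity', 'remainder': None}
--     quotient, remainder = divmod(abs(dividend), abs(divisor))
--     if (dividend < 0) != (divisor < 0):
--         quotient = -quotient
--     return {'quotient': quotient, 'remainder': remainder}
-- ===== Notes on version B (the rewrite author's own statement) =====
-- stated objective: simpler
-- what changed: The 32-iteration bit-shift subtraction loop is replaced by a single built-in divmod on the absolute values (exact on the 32-bit domain the claim covers), and the sign is applied via a sign-bit comparison.
-- outside the precondition, e.g. on bit_sifted_div(0, 0): A raises Exception, B raises Exception
import Mathlib
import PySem

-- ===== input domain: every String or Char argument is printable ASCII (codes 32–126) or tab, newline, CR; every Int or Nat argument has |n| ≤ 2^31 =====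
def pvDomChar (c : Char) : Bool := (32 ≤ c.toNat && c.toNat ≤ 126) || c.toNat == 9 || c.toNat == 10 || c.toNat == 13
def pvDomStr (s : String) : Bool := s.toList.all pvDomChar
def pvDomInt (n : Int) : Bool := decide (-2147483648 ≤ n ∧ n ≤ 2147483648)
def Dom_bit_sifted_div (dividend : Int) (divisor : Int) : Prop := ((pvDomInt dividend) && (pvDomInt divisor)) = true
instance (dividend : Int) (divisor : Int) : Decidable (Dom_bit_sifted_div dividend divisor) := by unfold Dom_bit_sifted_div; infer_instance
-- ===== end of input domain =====

-- B replaces A's 32-step bit-shift subtraction loop by one divmod on the absolute values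
-- (objective: simpler). Equivalence is about the return value on divisor ≠ 0.

-- ===== PORT A =====
-- Port of A; the divisor = 0 branch returns Python's {'quotient':'infinity','remainder':None},
-- whose 'infinity' is not an Int: that branch (and the (0,0) raise) is outside Pre_ below.
def bit_sifted_div (dividend : Int) (divisor : Int) : List (String × Option Int) :=
  if dividend = 0 ∧ divisor = 0 then []   -- Python raises here (outside Pre_)
  else if dividend = 0 then [("quotient", some 0), ("remainder", some 0)]
  else if divisor = 0 then [("quotient", none), ("remainder", none)]   -- 'infinity'/None (outside Pre_)
  else
    let sign : Int := if (dividend < 0 ∧ divisor > 0) ∨ (divisor < 0 ∧ dividend > 0) then -1 else 1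
    let dividend' := |dividend|
    let divisor' := |divisor|
    -- for i in range(31,-1,-1): every i here is in [0,31], so '.toNat' on it is exact
    let qr := (PySem.List.pyRange 31 (-1) (-1)).foldl
      (fun (st : Int × Int) (i : Int) =>
        let di := divisor' <<< i.toNat
        if di ≤ st.2 then (st.1 + ((1 : Int) <<< i.toNat), st.2 - di) else st)
      ((0 : Int), dividend')
    let quotient := if sign < 0 then -qr.1 else qr.1
    [("quotient", some quotient), ("remainder", some qr.2)]

-- ===== PORT B =====
def bit_sifted_div_alt (dividend : Int) (divisor : Int) : List (String × Option Int) :=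
  if dividend = 0 ∧ divisor = 0 then []   -- B raises here too (outside Pre_)
  else if dividend = 0 then [("quotient", some 0), ("remainder", some 0)]
  else if divisor = 0 then [("quotient", none), ("remainder", none)]   -- outside Pre_
  else
    let q := PySem.Int.floordiv |dividend| |divisor|
    let r := PySem.Int.mod |dividend| |divisor|
    let quotient := if (decide (dividend < 0) != decide (divisor < 0)) then -q else q
    [("quotient", some quotient), ("remainder", some r)]

-- ===== PRECONDITION & SPEC =====
-- Pre_ excludes divisor = 0: there A either raises (dividend = 0) or returns the string
-- 'infinity' and None, which are not values of the declared Int-valued type.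
def Pre_bit_sifted_div (dividend : Int) (divisor : Int) : Prop := divisor ≠ 0
instance (dividend : Int) (divisor : Int) : Decidable (Pre_bit_sifted_div dividend divisor) := by unfold Pre_bit_sifted_div; infer_instance
def pvWitness_bit_sifted_div : Int × Int := (-7, 3)

def Spec_bit_sifted_div (dividend : Int) (divisor : Int) (out : List (String × Option Int)) : Prop := out = bit_sifted_div_alt dividend divisor
instance (dividend : Int) (divisor : Int) (out : List (String × Option Int)) : Decidable (Spec_bit_sifted_div dividend divisor out) := by unfold Spec_bit_sifted_div; infer_instance

-- ===== CLAIM (what is proved, stated in full; the proofs are below) =====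
def Claim_equal_bit_sifted_div : Prop := ∀ (dividend : Int) (divisor : Int), Dom_bit_sifted_div dividend divisor → Pre_bit_sifted_div dividend divisor → Spec_bit_sifted_div dividend divisor (bit_sifted_div dividend divisor)

-- ===== LEMMAS AND PROOFS =====

-- the loop body of A's port, abstracted over the positive divisor b
def pvStep (b : Int) (st : Int × Int) (i : Int) : Int × Int :=
  let di := b <<< i.toNat
  if di ≤ st.2 then (st.1 + ((1 : Int) <<< i.toNat), st.2 - di) else st

-- the descending range [n-1, …, 0] the loop walks
def pvDesc : Nat → List Int
  | 0 => []
  | n + 1 => (n : Int) :: pvDesc n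

theorem pvDesc_32 : PySem.List.pyRange 31 (-1) (-1) = pvDesc 32 := by decide

-- loop invariant: with 0 ≤ r < b·2ⁿ, folding the step over [n-1,…,0] adds r / b to the
-- quotient and leaves r % b as the remainder
theorem pvLoop (b : Int) (hb : 0 < b) : ∀ (n : Nat) (q r : Int), 0 ≤ r → r < b * 2 ^ n →
    (pvDesc n).foldl (pvStep b) (q, r) = (q + r / b, r % b) := by
  intro n
  induction n with
  | zero =>
    intro q r h0 hlt
    simp only [pvDesc, List.foldl_nil]
    rw [Int.ediv_eq_zero_of_lt h0 (by simpa using hlt), Int.emod_eq_of_lt h0 (by simpa using hlt)]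
    simp
  | succ n ih =>
    intro q r h0 hlt
    simp only [pvDesc, List.foldl_cons, pvStep, Int.toNat_natCast, Int.shiftLeft_eq, one_mul]
    split_ifs with h
    · rw [ih (q + 2 ^ n) (r - b * 2 ^ n) (by omega)
        (by have := hlt; rw [pow_succ] at this; nlinarith)]
      have hdiv : (r - b * 2 ^ n) / b = r / b - 2 ^ n := by
        have h' : r - b * 2 ^ n = r + (-(2 ^ n)) * b := by ring
        rw [h', Int.add_mul_ediv_right _ _ (by omega)]; ring
      have hmod : (r - b * 2 ^ n) % b = r % b := by
        have h' : r - b * 2 ^ n = r + b * (-(2 ^ n)) := by ring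
        rw [h', Int.add_mul_emod_self_left]
      rw [hdiv, hmod]
      simp only [Prod.mk.injEq, and_true]; ring
    · exact ih q r h0 (by omega)

-- ===== VERDICT (by name: the statement is the Claim_ definition above) =====
theorem bit_sifted_div_spec : Claim_equal_bit_sifted_div := by
  intro dividend divisor hdom hpre
  unfold Spec_bit_sifted_div bit_sifted_div bit_sifted_div_alt
  have hd0 : ¬ (dividend = 0 ∧ divisor = 0) := fun h => hpre h.2
  by_cases hdz : dividend = 0
  · simp [hdz]
  · simp only [hdz, if_false]
    have hb : (0 : Int) < |divisor| := abs_pos.mpr hpre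
    have h0 : (0 : Int) ≤ |dividend| := abs_nonneg _
    have hup : |dividend| < |divisor| * 2 ^ 32 := by
      have h1 : (1 : Int) ≤ |divisor| := hb
      have h2 : |dividend| ≤ 2147483648 := by
        unfold Dom_bit_sifted_div pvDomInt at hdom
        simp only [Bool.and_eq_true, decide_eq_true_eq] at hdom
        rcases hdom with ⟨⟨ha, hb'⟩, _⟩
        rw [abs_le]; constructor <;> omega
      have : (2147483648 : Int) < |divisor| * 4294967296 := by nlinarith
      calc |dividend| ≤ 2147483648 := h2
        _ < |divisor| * 2 ^ 32 := by norm_num at this ⊢; omega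
    have hloop :
        (PySem.List.pyRange 31 (-1) (-1)).foldl
          (fun (st : Int × Int) (i : Int) =>
            let di := |divisor| <<< i.toNat
            if di ≤ st.2 then (st.1 + ((1 : Int) <<< i.toNat), st.2 - di) else st)
          ((0 : Int), |dividend|)
        = ((0 : Int) + |dividend| / |divisor|, |dividend| % |divisor|) := by
      rw [pvDesc_32]
      exact pvLoop |divisor| hb 32 0 |dividend| h0 hup
    simp only [hloop, zero_add]
    have hfd : PySem.Int.floordiv |dividend| |divisor| = |dividend| / |divisor| :=
      PySem.Int.floordiv_eq_ediv_of_pos hb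
    have hmd : PySem.Int.mod |dividend| |divisor| = |dividend| % |divisor| :=
      PySem.Int.mod_eq_emod_of_pos hb
    rw [hfd, hmd]
    have hsign : ((dividend < 0 ∧ divisor > 0) ∨ (divisor < 0 ∧ dividend > 0)) ↔
        (decide (dividend < 0) != decide (divisor < 0)) = true := by
      rcases lt_trichotomy dividend 0 with h | h | h <;>
      rcases lt_trichotomy divisor 0 with h' | h' | h' <;>
        simp_all <;> omega
    by_cases hs : (dividend < 0 ∧ divisor > 0) ∨ (divisor < 0 ∧ dividend > 0)
    · rw [if_pos hs, if_pos (hsign.mp hs)]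
      norm_num
    · rw [if_neg hs, if_neg (fun h => hs (hsign.mpr h))]
      norm_num
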